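-- pv_equiv track=rewrite | github.com/lacithelaci/oktatas | erettsegi/2008 október/robot.py | utmegtetel
-- ===== SOURCE A (Python) =====
-- def utmegtetel(a):
--     db = 0
--     elozo = ""
--     elso = ""
--     for i in a:
--         elso = i
--         if elso == elozo:
--             db += 1
--         else:
--             db += 3
--         elozo = i
--     return db
-- ===== SOURCE B (Python) =====
-- def utmegtetel(a):
--     # Run-based scan over the sentinel-prefixed list [""] + a: each maximal block of
--     # k equal consecutive elements costs k + 2 (3 for its first element, 1 per repeat);
--     # the sentinel's own block is overcharged by exactly 3, subtracted at the end.
--     b = [""] + a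
--     total = 0
--     i = 0
--     n = len(b)
--     while i < n:
--         j = i + 1
--         while j < n and b[j] == b[i]:
--             j += 1
--         total += (j - i) + 2
--         i = j
--     return total - 3
-- ===== Notes on version B (the rewrite author's own statement) =====
-- stated objective: alternative
-- what changed: Replaces A's element-by-element fold carrying the previous element with a two-level run scan over the sentinel-prefixed list: an outer loop over maximal blocks of equal consecutive elements, an inner loop finding each block's end, charging k+2 per block of length k and subtracting the sentinel block's overhead of 3.
import Mathlib
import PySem

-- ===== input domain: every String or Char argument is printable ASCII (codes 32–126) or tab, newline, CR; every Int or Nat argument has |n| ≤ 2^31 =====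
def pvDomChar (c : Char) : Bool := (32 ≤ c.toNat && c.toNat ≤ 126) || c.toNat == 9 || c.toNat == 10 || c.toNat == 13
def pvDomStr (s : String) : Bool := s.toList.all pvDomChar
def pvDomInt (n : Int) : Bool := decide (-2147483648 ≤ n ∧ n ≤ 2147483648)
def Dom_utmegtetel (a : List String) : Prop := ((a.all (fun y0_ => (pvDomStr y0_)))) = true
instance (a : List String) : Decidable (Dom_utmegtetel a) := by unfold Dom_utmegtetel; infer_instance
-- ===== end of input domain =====

-- B scans maximal runs of equal consecutive elements over the sentinel-prefixed list
-- [""] ++ a (outer loop per block, inner loop to the block's end, k+2 per block of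
-- length k, minus the sentinel block's overhead of 3) instead of A's per-element fold;
-- objective: alternative.

-- ===== PORT A =====
def utmegtetel (a : List String) : Int :=
  (a.foldl (fun (s : Int × String) i =>
    let elso := i
    (if elso == s.2 then s.1 + 1 else s.1 + 3, i)) (0, "")).1

-- ===== PORT B =====
-- inner while loop of Source B: advance j while j < len(a) and a[j] == x
-- (fuel = a.length bounds the trip count and only makes the loop total;
--  a.getD j "" is consulted only under the guard j < a.length, where it is Python's a[j])
def pvRunEnd (a : List String) (x : String) (fuel : Nat) (j : Nat) : Nat :=
  match fuel with
  | 0 => j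
  | fuel + 1 =>
      if j < a.length ∧ (a.getD j "" == x) = true then pvRunEnd a x fuel (j + 1) else j

-- outer while loop of Source B over block starts (fuel = a.length bounds the trip count)
def pvOuter (a : List String) (fuel : Nat) (i : Nat) (total : Int) : Int :=
  match fuel with
  | 0 => total
  | fuel + 1 =>
      if i < a.length then
        let j := pvRunEnd a (a.getD i "") a.length (i + 1)
        pvOuter a fuel j (total + ((j : Int) - (i : Int)) + 2)
      else total

def utmegtetel_alt (a : List String) : Int :=
  let b := "" :: a
  pvOuter b b.length 0 0 - 3

-- ===== PRECONDITION & SPEC =====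
def Spec_utmegtetel (a : List String) (out : Int) : Prop := out = utmegtetel_alt a
instance (a : List String) (out : Int) : Decidable (Spec_utmegtetel a out) := by unfold Spec_utmegtetel; infer_instance

-- ===== CLAIM (what is proved, stated in full; the proofs are below) =====
def Claim_equal_utmegtetel : Prop := ∀ (a : List String), Dom_utmegtetel a → Spec_utmegtetel a (utmegtetel a)

-- ===== LEMMAS AND PROOFS =====

-- leading-run length, the proofs' clean view of the inner loop
def pvRun (x : String) : List String → Nat
  | [] => 0
  | y :: ys => if y == x then 1 + pvRun x ys else 0

-- clean recursive view of B: one step per maximal block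
def pvAltRec : List String → Int
  | [] => 0
  | x :: xs =>
      have : (xs.drop (pvRun x xs)).length < (x :: xs).length := by
        simp [List.length_drop]
      (1 + (pvRun x xs : Nat) + 2 : Int) + pvAltRec (xs.drop (pvRun x xs))
termination_by l => l.length

theorem pvRunEnd_eq (a : List String) (x : String) (fuel : Nat) :
    ∀ (j : Nat), a.length ≤ j + fuel →
      pvRunEnd a x fuel j = j + pvRun x (a.drop j) := by
  induction fuel with
  | zero =>
    intro j hf
    rw [pvRunEnd, List.drop_eq_nil_of_le (by omega)]
    simp [pvRun]
  | succ fuel ih =>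
    intro j hf
    rw [pvRunEnd]
    by_cases hlt : j < a.length
    · have hd : a.drop j = a.getD j "" :: a.drop (j + 1) := by
        rw [List.drop_eq_getElem_cons hlt, List.getD_eq_getElem?_getD,
          List.getElem?_eq_getElem hlt, Option.getD_some]
      rw [hd]
      by_cases hb : (a.getD j "" == x) = true
      · rw [if_pos ⟨hlt, hb⟩, ih (j + 1) (by omega)]
        simp only [pvRun, hb, if_pos]
        omega
      · rw [if_neg (by tauto)]
        simp only [pvRun]
        rw [if_neg hb]
        omega
    · rw [if_neg (by tauto), List.drop_eq_nil_of_le (by omega)]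
      simp [pvRun]

theorem pvOuter_eq (a : List String) (fuel : Nat) :
    ∀ (i : Nat) (total : Int), a.length ≤ i + fuel →
      pvOuter a fuel i total = total + pvAltRec (a.drop i) := by
  induction fuel with
  | zero =>
    intro i total hf
    rw [pvOuter, List.drop_eq_nil_of_le (by omega)]
    simp [pvAltRec]
  | succ fuel ih =>
    intro i total hf
    rw [pvOuter]
    by_cases h : i < a.length
    · rw [if_pos h]
      have hd : a.drop i = a.getD i "" :: a.drop (i + 1) := by
        rw [List.drop_eq_getElem_cons h, List.getD_eq_getElem?_getD,
          List.getElem?_eq_getElem h, Option.getD_some]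
      have hj := pvRunEnd_eq a (a.getD i "") a.length (i + 1) (by omega)
      set x := a.getD i "" with hx
      set r := pvRun x (a.drop (i + 1)) with hr
      have hdrop : a.drop (pvRunEnd a x a.length (i + 1)) = (a.drop (i + 1)).drop r := by
        rw [hj, List.drop_drop, Nat.add_comm]
      rw [ih (pvRunEnd a x a.length (i + 1)) _ (by omega), hdrop, hd]
      conv_rhs => rw [pvAltRec]
      rw [hj, ← hr]
      push_cast
      ring
    · rw [if_neg h, List.drop_eq_nil_of_le (by omega)]
      simp [pvAltRec]

-- indicator: 2 if the list starts with prev, else 0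
def pvInd (prev : String) : List String → Int
  | [] => 0
  | y :: _ => if y == prev then 2 else 0

theorem pvAltRec_cons (x : String) (xs : List String) :
    pvAltRec (x :: xs) = 3 + pvAltRec xs - pvInd x xs := by
  cases xs with
  | nil => simp [pvAltRec, pvRun, pvInd]
  | cons y ys =>
    by_cases hb : (y == x) = true
    · have hxy : y = x := by simpa using hb
      subst hxy
      rw [pvAltRec, pvAltRec]
      simp only [pvRun, hb, if_pos, pvInd]
      rw [show 1 + pvRun y ys = pvRun y ys + 1 from Nat.add_comm _ _, List.drop_succ_cons]
      push_cast
      ring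
    · rw [pvAltRec]
      simp [pvRun, hb, pvInd]

theorem utmegtetel_loop (a : List String) : ∀ (db : Int) (prev : String),
    (a.foldl (fun (s : Int × String) i =>
      let elso := i
      (if elso == s.2 then s.1 + 1 else s.1 + 3, i)) (db, prev)).1
    = db + pvAltRec a - pvInd prev a := by
  induction a with
  | nil => intro db prev; simp [pvAltRec, pvInd]
  | cons x xs ih =>
    intro db prev
    simp only [List.foldl]
    rw [ih, pvAltRec_cons]
    by_cases hb : (x == prev) = true
    · simp only [pvInd, hb, if_pos]
      ring
    · simp only [pvInd, hb, Bool.false_eq_true]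
      split_ifs <;> ring

-- ===== VERDICT (by name: the statement is the Claim_ definition above) =====
theorem utmegtetel_spec : Claim_equal_utmegtetel := by
  intro a _
  unfold Spec_utmegtetel utmegtetel utmegtetel_alt
  rw [utmegtetel_loop]
  show _ = pvOuter ("" :: a) ("" :: a).length 0 0 - 3
  rw [pvOuter_eq ("" :: a) ("" :: a).length 0 0 (by omega)]
  simp only [List.drop_zero]
  rw [pvAltRec_cons]
  ring
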